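-- pv_equiv track=rewrite | github.com/chronograph-pe/dependency-track-gh-action | app/tools.py | get_license_names
-- ===== SOURCE A (Python) =====
-- def get_license_names(license_list):
--     license_name = None
--
--     while type(license_name) != str:
--         if type(license_list) == list:
--             license_name = ', '.join(license_list)
--         elif type(license_list) == dict:
--             license_name = license_list.get("type", "unknown")
--         else:
--             license_name = str(license_list)
--
--         license_list = license_name
--
--     if "or" in license_name.lower():
--         licenses = license_name.lower().split("or")
--         licenses = [s.replace("(", "") for s in licenses]
--         licenses = [s.replace(")", "") for s in licenses]
--         licenses = [s.strip() for s in licenses]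
--     else:
--         licenses = [license_name.strip()]
--
--     return licenses
-- ===== SOURCE B (Python) =====
-- def get_license_names(license_list):
--     name = ", ".join(license_list)
--     low = name.lower()
--     if low.find("or") < 0:
--         return [name.strip()]
--     return _pieces(low)
--
--
-- def _pieces(s):
--     i = s.find("or")
--     if i < 0:
--         return [_clean(s)]
--     return [_clean(s[:i])] + _pieces(s[i + 2:])
--
--
-- def _clean(s):
--     return "".join(c for c in s if c not in "()").strip()
-- ===== Notes on version B (the rewrite author's own statement) =====
-- stated objective: alternative
-- what changed: Replaces the while-type-fixpoint plus split('or') plus three list-comprehension passes (two replaces and a strip per piece) with a direct join followed by a recursive find-based splitter that emits each piece already cleaned by a single character filter and strip.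
import Mathlib
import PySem

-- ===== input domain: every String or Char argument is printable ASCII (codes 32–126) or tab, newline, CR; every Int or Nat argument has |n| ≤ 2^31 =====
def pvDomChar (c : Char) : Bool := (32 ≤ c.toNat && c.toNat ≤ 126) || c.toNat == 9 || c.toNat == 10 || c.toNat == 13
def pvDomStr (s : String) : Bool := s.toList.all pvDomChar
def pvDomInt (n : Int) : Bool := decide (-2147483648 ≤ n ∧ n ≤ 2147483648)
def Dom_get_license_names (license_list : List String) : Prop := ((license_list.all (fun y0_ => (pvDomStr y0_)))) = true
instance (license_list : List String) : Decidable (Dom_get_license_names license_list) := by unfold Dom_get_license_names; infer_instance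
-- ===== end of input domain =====

-- B replaces the while-type-fixpoint + split('or') + three per-piece passes by a recursive
-- find-based splitter emitting each piece cleaned by one character filter; objective: alternative.

-- ===== PORT A =====
-- The argument is statically a list of strings, so A's while loop takes the list branch
-- exactly once: license_name = ", ".join(license_list) is a str and the loop exits.
def get_license_names (license_list : List String) : List String :=
  let license_name : List Char := PySem.Chars.join (", ".toList) (license_list.map String.toList)
  if PySem.Chars.isIn ("or".toList) (PySem.Chars.lower license_name) then
    let licenses := PySem.Chars.splitOn (PySem.Chars.lower license_name) ("or".toList)
    let licenses := licenses.map (fun s => PySem.Chars.replace s ("(".toList) ("".toList))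
    let licenses := licenses.map (fun s => PySem.Chars.replace s (")".toList) ("".toList))
    let licenses := licenses.map (fun s => PySem.Chars.strip s)
    licenses.map String.ofList
  else
    [String.ofList (PySem.Chars.strip license_name)]

-- ===== PORT B =====
-- termination fact pvPieces cites: after a hit of "or" at index i, dropping i+2 chars shrinks s
theorem pvFindDrop (s : List Char) (h : ¬ PySem.Chars.find s ("or".toList) < 0) :
    (s.drop ((PySem.Chars.find s ("or".toList)).toNat + 2)).length < s.length := by
  have h0 : (0 : Int) ≤ PySem.Chars.find s ("or".toList) := by omega
  have hp := (PySem.Chars.find_spec h0).1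
  have hlen := hp.length_le
  simp only [List.length_drop] at *
  have : ("or".toList).length = 2 := rfl
  omega

-- _clean: one filter pass dropping parens, then strip
def pvClean (s : List Char) : List Char :=
  PySem.Chars.strip (s.filter (fun c => !(c == '(' || c == ')')))

-- _pieces: recursive find-based splitter on "or", cleaning each piece as it is emitted
def pvPieces (s : List Char) : List String :=
  let i := PySem.Chars.find s ("or".toList)
  if h : i < 0 then [String.ofList (pvClean s)]
  else String.ofList (pvClean (s.take i.toNat)) :: pvPieces (s.drop (i.toNat + 2))
termination_by s.length
decreasing_by exact pvFindDrop s h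

def get_license_names_alt (license_list : List String) : List String :=
  let name : List Char := PySem.Chars.join (", ".toList) (license_list.map String.toList)
  let low := PySem.Chars.lower name
  if PySem.Chars.find low ("or".toList) < 0 then [String.ofList (PySem.Chars.strip name)]
  else pvPieces low

-- ===== PRECONDITION & SPEC =====
def Spec_get_license_names (license_list : List String) (out : List String) : Prop := out = get_license_names_alt license_list
instance (license_list : List String) (out : List String) : Decidable (Spec_get_license_names license_list out) := by unfold Spec_get_license_names; infer_instance

-- ===== CLAIM (what is proved, stated in full; the proofs are below) =====
def Claim_equal_get_license_names : Prop := ∀ (license_list : List String), Dom_get_license_names license_list → Spec_get_license_names license_list (get_license_names license_list)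

-- ===== LEMMAS AND PROOFS =====

-- reference splitter: what s.split("or") produces, in recursive find form
def sfind (s : List Char) : List (List Char) :=
  let i := PySem.Chars.find s ("or".toList)
  if h : i < 0 then [s]
  else s.take i.toNat :: sfind (s.drop (i.toNat + 2))
termination_by s.length
decreasing_by exact pvFindDrop s h

theorem sfind_neg (s : List Char) (h : PySem.Chars.find s ['o', 'r'] < 0) : sfind s = [s] := by
  rw [sfind]; exact dif_pos h

theorem sfind_pos (s : List Char) (h : ¬ PySem.Chars.find s ['o', 'r'] < 0) :
    sfind s = s.take (PySem.Chars.find s ['o', 'r']).toNat ::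
      sfind (s.drop ((PySem.Chars.find s ['o', 'r']).toNat + 2)) := by
  rw [sfind]; exact dif_neg h

theorem sfind_ne_nil (s : List Char) : sfind s ≠ [] := by
  by_cases h : PySem.Chars.find s ['o', 'r'] < 0
  · rw [sfind_neg s h]; simp
  · rw [sfind_pos s h]; simp

theorem find_go_shift (sub : List Char) (hsub : sub ≠ []) :
    ∀ (l : List Char) (k : Nat), PySem.Chars.find.go sub l k =
      if PySem.Chars.find l sub = -1 then -1 else PySem.Chars.find l sub + k := by
  intro l
  induction l with
  | nil =>
    intro k
    simp [PySem.Chars.find, PySem.Chars.find.go, List.isEmpty_iff, hsub]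
  | cons c t ih =>
    intro k
    by_cases hp : sub.isPrefixOf (c :: t) = true
    · have hgo : PySem.Chars.find.go sub (c :: t) k = (k : Int) := by
        simp [PySem.Chars.find.go, hp]
      have hfind : PySem.Chars.find (c :: t) sub = 0 := by
        simp [PySem.Chars.find, PySem.Chars.find.go, hp]
      rw [hgo, hfind]
      norm_num
    · have h1 : PySem.Chars.find.go sub (c :: t) k = PySem.Chars.find.go sub t (k + 1) := by
        simp [PySem.Chars.find.go, hp]
      have h2 : PySem.Chars.find (c :: t) sub = PySem.Chars.find.go sub t 1 := by
        simp [PySem.Chars.find, PySem.Chars.find.go, hp]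
      rw [h1, h2, ih (k + 1), ih 1]
      have hge : -1 ≤ PySem.Chars.find t sub := PySem.Chars.neg_one_le_find t sub
      by_cases hm : PySem.Chars.find t sub = -1
      · simp [hm]
      · rw [if_neg hm, if_neg (by omega), if_neg (by omega)]
        omega

theorem replace_go_filter (c : Char) :
    ∀ (fuel : Nat) (l acc : List Char), l.length ≤ fuel →
      PySem.Chars.replace.go [c] [] fuel l acc = acc.reverse ++ l.filter (fun x => !(x == c)) := by
  intro fuel
  induction fuel with
  | zero =>
    intro l acc h
    have : l = [] := List.eq_nil_of_length_eq_zero (Nat.le_zero.mp h)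
    subst this
    simp [PySem.Chars.replace.go]
  | succ fuel ih =>
    intro l acc h
    cases l with
    | nil => simp [PySem.Chars.replace.go]
    | cons c' t =>
      by_cases hc : c' = c
      · subst hc
        have hp : List.isPrefixOf [c'] (c' :: t) = true := by simp [List.isPrefixOf]
        simp only [PySem.Chars.replace.go, hp, if_pos, List.reverse_nil, List.nil_append]
        have hd : List.drop ([c'].length) (c' :: t) = t := rfl
        rw [hd, ih t acc (by simp at h; omega)]
        simp
      · have hp : List.isPrefixOf [c] (c' :: t) = false := by
          simp [List.isPrefixOf]; exact fun h' => (hc h'.symm).elim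
        simp only [PySem.Chars.replace.go, hp]
        rw [ih t (c' :: acc) (by simp at h; omega)]
        simp [hc]

theorem replace_single (c : Char) (s : List Char) :
    PySem.Chars.replace s [c] [] = s.filter (fun x => !(x == c)) := by
  simp [PySem.Chars.replace, replace_go_filter c s.length s [] (le_refl _)]

theorem splitOn_go_zero (sep l cur : List Char) (accs : List (List Char)) :
    PySem.Chars.splitOn.go sep 0 l cur accs = ((cur.reverse ++ l) :: accs).reverse := rfl

theorem splitOn_go_succ_nil (sep cur : List Char) (fuel : Nat) (accs : List (List Char)) :
    PySem.Chars.splitOn.go sep (fuel + 1) [] cur accs = (cur.reverse :: accs).reverse := rfl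

theorem splitOn_go_succ_cons (sep cur : List Char) (fuel : Nat) (c : Char) (rest : List Char)
    (accs : List (List Char)) :
    PySem.Chars.splitOn.go sep (fuel + 1) (c :: rest) cur accs =
      if sep.isPrefixOf (c :: rest) then
        PySem.Chars.splitOn.go sep fuel (List.drop sep.length (c :: rest)) [] (cur.reverse :: accs)
      else PySem.Chars.splitOn.go sep fuel rest (c :: cur) accs := rfl

theorem find_cons_or (c : Char) (rest : List Char) :
    PySem.Chars.find (c :: rest) ['o', 'r'] =
      if List.isPrefixOf ['o', 'r'] (c :: rest) then 0
      else if PySem.Chars.find rest ['o', 'r'] = -1 then -1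
      else PySem.Chars.find rest ['o', 'r'] + 1 := by
  by_cases hp : List.isPrefixOf ['o', 'r'] (c :: rest) = true
  · rw [if_pos hp]
    simp [PySem.Chars.find, PySem.Chars.find.go, hp]
  · rw [if_neg hp]
    have h2 : PySem.Chars.find (c :: rest) ['o', 'r'] = PySem.Chars.find.go ['o', 'r'] rest 1 := by
      simp [PySem.Chars.find, PySem.Chars.find.go, hp]
    rw [h2, find_go_shift ['o', 'r'] (by decide) rest 1]
    norm_num

theorem find_nil_or : PySem.Chars.find ([] : List Char) ['o', 'r'] = -1 := by
  simp [PySem.Chars.find, PySem.Chars.find.go]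

theorem splitOn_go_sfind :
    ∀ (fuel : Nat) (l cur : List Char) (accs : List (List Char)), l.length ≤ fuel →
      PySem.Chars.splitOn.go ['o', 'r'] fuel l cur accs =
        accs.reverse ++ (sfind l).modifyHead (fun p => cur.reverse ++ p) := by
  intro fuel
  induction fuel with
  | zero =>
    intro l cur accs h
    have : l = [] := List.eq_nil_of_length_eq_zero (Nat.le_zero.mp h)
    subst this
    rw [splitOn_go_zero, sfind_neg [] (by rw [find_nil_or]; omega)]
    simp
  | succ fuel ih =>
    intro l cur accs h
    cases l with
    | nil =>
      rw [splitOn_go_succ_nil, sfind_neg [] (by rw [find_nil_or]; omega)]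
      simp
    | cons c rest =>
      rw [splitOn_go_succ_cons]
      by_cases hp : List.isPrefixOf ['o', 'r'] (c :: rest) = true
      · rw [if_pos hp]
        have hdl : List.drop (['o', 'r'].length) (c :: rest) = List.drop 2 (c :: rest) := rfl
        rw [hdl]
        have hf0 : PySem.Chars.find (c :: rest) ['o', 'r'] = 0 := by
          rw [find_cons_or, if_pos hp]
        rw [ih _ _ _ (by simp at h ⊢; omega)]
        rw [sfind_pos (c :: rest) (by rw [hf0]; omega), hf0]
        rcases hq : sfind (List.drop 2 (c :: rest)) with _ | ⟨q, qs⟩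
        · exact absurd hq (sfind_ne_nil _)
        · simp only [Int.toNat_zero, List.take_zero, Nat.zero_add]
          rw [hq]
          simp
      · rw [if_neg hp]
        rw [ih _ _ _ (by simp at h ⊢; omega)]
        have hge : -1 ≤ PySem.Chars.find rest ['o', 'r'] := PySem.Chars.neg_one_le_find rest ['o', 'r']
        have hstep := find_cons_or c rest
        rw [if_neg hp] at hstep
        by_cases hm : PySem.Chars.find rest ['o', 'r'] = -1
        · rw [sfind_neg rest (by omega), sfind_neg (c :: rest) (by rw [hstep, if_pos hm]; omega)]
          simp
        · have hfl : PySem.Chars.find (c :: rest) ['o', 'r'] =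
              PySem.Chars.find rest ['o', 'r'] + 1 := by rw [hstep, if_neg hm]
          rw [sfind_pos rest (by omega), sfind_pos (c :: rest) (by rw [hfl]; omega), hfl]
          have ht : (PySem.Chars.find rest ['o', 'r'] + 1).toNat =
              (PySem.Chars.find rest ['o', 'r']).toNat + 1 := by omega
          rw [ht]
          simp only [List.take_succ_cons, List.drop_succ_cons, List.modifyHead_cons,
            List.reverse_cons]
          rw [List.append_assoc]
          simp

theorem splitOn_eq_sfind (s : List Char) :
    PySem.Chars.splitOn s ['o', 'r'] = sfind s := by
  rw [PySem.Chars.splitOn, splitOn_go_sfind (s.length + 1) s [] [] (by omega)]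
  rcases hq : sfind s with _ | ⟨q, qs⟩
  · exact absurd hq (sfind_ne_nil _)
  · simp

theorem pvPieces_unfold (s : List Char) :
    pvPieces s = if _ : PySem.Chars.find s ['o', 'r'] < 0 then [String.ofList (pvClean s)]
      else String.ofList (pvClean (s.take (PySem.Chars.find s ['o', 'r']).toNat)) ::
        pvPieces (s.drop ((PySem.Chars.find s ['o', 'r']).toNat + 2)) := by
  rw [pvPieces]
  rfl

theorem pieces_eq (s : List Char) :
    pvPieces s = (sfind s).map (fun p => String.ofList (pvClean p)) := by
  by_cases h : PySem.Chars.find s ['o', 'r'] < 0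
  · rw [pvPieces_unfold, dif_pos h, sfind_neg s h]
    simp only [List.map_cons, List.map_nil]
  · rw [pvPieces_unfold, dif_neg h, sfind_pos s h]
    simp only [List.map_cons]
    rw [pieces_eq (s.drop ((PySem.Chars.find s ['o', 'r']).toNat + 2))]
termination_by s.length
decreasing_by exact pvFindDrop s h

theorem clean_eq (p : List Char) :
    PySem.Chars.strip (PySem.Chars.replace (PySem.Chars.replace p ['('] []) [')'] []) =
      pvClean p := by
  rw [replace_single, replace_single, pvClean, List.filter_filter]
  congr 1
  apply List.filter_congr
  intro c _
  by_cases hc1 : c = '(' <;> by_cases hc2 : c = ')' <;> simp [hc1, hc2, Bool.and_comm]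

-- ===== VERDICT (by name: the statement is the Claim_ definition above) =====
theorem get_license_names_spec : Claim_equal_get_license_names := by
  intro license_list _
  unfold Spec_get_license_names get_license_names get_license_names_alt
  simp only [List.map_map,
    show ("or".toList : List Char) = ['o', 'r'] from rfl,
    show (", ".toList : List Char) = [',', ' '] from rfl,
    show ("(".toList : List Char) = ['('] from rfl,
    show (")".toList : List Char) = [')'] from rfl,
    show ("".toList : List Char) = ([] : List Char) from rfl]
  generalize PySem.Chars.join [',', ' '] (license_list.map String.toList) = nm
  generalize PySem.Chars.lower nm = low
  have hge : -1 ≤ PySem.Chars.find low ['o', 'r'] := PySem.Chars.neg_one_le_find low ['o', 'r']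
  by_cases hf : PySem.Chars.find low ['o', 'r'] < 0
  · have hin : PySem.Chars.isIn ['o', 'r'] low = false := by
      have : PySem.Chars.find low ['o', 'r'] = -1 := by omega
      simp [PySem.Chars.isIn, this]
    simp only [hin, Bool.false_eq_true, if_false, if_pos hf]
  · have hin : PySem.Chars.isIn ['o', 'r'] low = true := by
      have : PySem.Chars.find low ['o', 'r'] ≠ -1 := by omega
      simp [PySem.Chars.isIn, this]
    simp only [hin, if_true, if_neg hf]
    rw [splitOn_eq_sfind, pieces_eq]
    apply List.map_congr_left
    intro p _
    simp only [Function.comp_apply]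
    rw [clean_eq p]
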